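-- pv_equiv track=rewrite | github.com/Yashraj191004/car_base | text_Extractor/textExtraction/reader.py | merge_engine_cap_maps
-- ===== SOURCE A (Python) =====
-- def merge_engine_cap_maps(primary, secondary):
--     """Merge capacity maps, preferring existing entries and filling missing engines/fields."""
--     if not primary:
--         return secondary or {}
--     if not secondary:
--         return primary
--
--     merged = {
--         engine: {
--             "with_filter": dict(values.get("with_filter")) if values.get("with_filter") else None,
--             "without_filter": dict(values.get("without_filter")) if values.get("without_filter") else None,
--         }
--         for engine, values in primary.items()
--     }
--
--     for engine, values in secondary.items():
--         current = merged.setdefault(engine, {"with_filter": None, "without_filter": None})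
--         for field in ("with_filter", "without_filter"):
--             if current.get(field) is None and values.get(field) is not None:
--                 current[field] = dict(values[field])
--
--     return merged
-- ===== SOURCE B (Python) =====
-- def merge_engine_cap_maps(primary, secondary):
--     """Single pass over the ordered union of engine keys; picks each field from primary if truthy, else secondary if not None."""
--     if not primary:
--         return secondary or {}
--     if not secondary:
--         return primary
--
--     keys = list(primary) + [e for e in secondary if e not in primary]
--
--     def pick(engine, field):
--         pv = (primary.get(engine) or {}).get(field)
--         if pv:
--             return dict(pv)
--         sv = (secondary.get(engine) or {}).get(field)
--         return dict(sv) if sv is not None else None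
--
--     return {e: {f: pick(e, f) for f in ("with_filter", "without_filter")} for e in keys}
-- ===== Notes on version B (the rewrite author's own statement) =====
-- stated objective: simpler
-- what changed: Replaces A's two-phase merge (a dict comprehension over primary followed by a setdefault/fill loop mutating entries from secondary) with a single pass over the ordered union of engine keys that picks each field directly from primary if truthy, else from secondary if not None.
import Mathlib
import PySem

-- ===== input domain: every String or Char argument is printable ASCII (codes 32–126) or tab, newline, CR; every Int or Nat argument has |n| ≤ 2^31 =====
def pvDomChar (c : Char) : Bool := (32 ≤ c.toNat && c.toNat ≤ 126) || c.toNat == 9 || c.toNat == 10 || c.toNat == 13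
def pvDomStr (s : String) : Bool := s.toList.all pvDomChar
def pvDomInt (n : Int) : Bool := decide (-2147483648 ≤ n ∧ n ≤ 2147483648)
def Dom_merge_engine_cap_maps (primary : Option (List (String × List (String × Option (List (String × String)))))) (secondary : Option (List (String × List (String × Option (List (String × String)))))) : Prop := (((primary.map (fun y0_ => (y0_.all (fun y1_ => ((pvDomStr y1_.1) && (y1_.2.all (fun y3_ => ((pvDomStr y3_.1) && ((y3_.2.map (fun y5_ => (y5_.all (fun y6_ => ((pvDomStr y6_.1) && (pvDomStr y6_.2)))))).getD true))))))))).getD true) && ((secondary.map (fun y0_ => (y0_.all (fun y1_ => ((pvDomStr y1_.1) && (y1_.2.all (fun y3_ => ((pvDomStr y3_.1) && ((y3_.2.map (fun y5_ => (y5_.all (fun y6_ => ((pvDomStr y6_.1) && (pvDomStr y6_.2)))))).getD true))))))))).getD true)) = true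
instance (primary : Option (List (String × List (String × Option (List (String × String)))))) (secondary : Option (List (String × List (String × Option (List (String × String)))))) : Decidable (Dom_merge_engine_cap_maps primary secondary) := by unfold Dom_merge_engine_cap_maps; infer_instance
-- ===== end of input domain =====

-- B replaces A's two-phase merge (dict comprehension over primary, then a setdefault/fill loop over
-- secondary) by a single pass over the ordered union of engine keys, picking each field directly;
-- objective: simpler (same cost). Input dicts are association lists; both ports read them through
-- PySem.Dict (Python dict semantics).

-- ===== PORT A =====
-- dict(l): a copy of l with Python-dict key semantics
def pvCopy (l : List (String × String)) : List (String × String) := (PySem.Dict.ofList l).items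

-- 'dict(x) if x else None'  (x : Optional[dict])
def pvInit (v : Option (List (String × String))) : Option (List (String × String)) :=
  match v with
  | some l => if l.isEmpty then none else some (pvCopy l)
  | none => none

-- body of A's inner 'for field in …' loop: fill current[field] from values if it is None
def pvFill (cur : PySem.Dict String (Option (List (String × String))))
    (vsd : PySem.Dict String (Option (List (String × String)))) (f : String) :
    PySem.Dict String (Option (List (String × String))) :=
  if (cur.get? f).getD none = none then
    match (vsd.get? f).getD none with
    | some l => cur.insert f (some (pvCopy l))
    | none => cur
  else cur

def pvDefaultEntry : PySem.Dict String (Option (List (String × String))) :=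
  PySem.Dict.ofList [("with_filter", none), ("without_filter", none)]

-- body of A's 'for engine, values in secondary.items()' loop
def pvStep (m : PySem.Dict String (PySem.Dict String (Option (List (String × String)))))
    (q : String × List (String × Option (List (String × String)))) :
    PySem.Dict String (PySem.Dict String (Option (List (String × String)))) :=
  let m1 := m.setdefault q.1 pvDefaultEntry
  let cur := (m1.get? q.1).getD PySem.Dict.empty
  let vsd := PySem.Dict.ofList q.2
  let cur2 := ["with_filter", "without_filter"].foldl (fun c f => pvFill c vsd f) cur
  m1.insert q.1 cur2

def merge_engine_cap_maps (primary : Option (List (String × List (String × Option (List (String × String)))))) (secondary : Option (List (String × List (String × Option (List (String × String)))))) : List (String × List (String × Option (List (String × String)))) :=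
  let pl := primary.getD []
  let sl := secondary.getD []
  if pl.isEmpty then (if sl.isEmpty then [] else sl)
  else if sl.isEmpty then pl
  else
    let pd := PySem.Dict.ofList pl
    let sd := PySem.Dict.ofList sl
    let m0 := PySem.Dict.ofList (pd.items.map (fun q =>
      let vd := PySem.Dict.ofList q.2
      (q.1, PySem.Dict.ofList
        [("with_filter", pvInit ((vd.get? "with_filter").getD none)),
         ("without_filter", pvInit ((vd.get? "without_filter").getD none))])))
    let m := sd.items.foldl pvStep m0
    m.items.map (fun q => (q.1, q.2.items))

-- ===== PORT B =====
-- 'dict(sv) if sv is not None else None'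
def pvPickS (svm : PySem.Dict String (Option (List (String × String)))) (f : String) :
    Option (List (String × String)) :=
  match (svm.get? f).getD none with
  | some l => some (pvCopy l)
  | none => none

-- B's pick(engine, field), given the two field maps of that engine
def pvPick (pvm svm : PySem.Dict String (Option (List (String × String)))) (f : String) :
    Option (List (String × String)) :=
  match (pvm.get? f).getD none with
  | some l => if l.isEmpty then pvPickS svm f else some (pvCopy l)
  | none => pvPickS svm f

def merge_engine_cap_maps_alt (primary : Option (List (String × List (String × Option (List (String × String)))))) (secondary : Option (List (String × List (String × Option (List (String × String)))))) : List (String × List (String × Option (List (String × String)))) :=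
  let pl := primary.getD []
  let sl := secondary.getD []
  if pl.isEmpty then (if sl.isEmpty then [] else sl)
  else if sl.isEmpty then pl
  else
    let pd := PySem.Dict.ofList pl
    let sd := PySem.Dict.ofList sl
    let keys := pd.keys ++ sd.keys.filter (fun e => !(pd.contains e))
    -- the outer/inner dict comprehensions over nodup keys, as their item lists
    keys.map (fun e =>
      let pvm := PySem.Dict.ofList ((pd.get? e).getD [])
      let svm := PySem.Dict.ofList ((sd.get? e).getD [])
      (e, ["with_filter", "without_filter"].map (fun f => (f, pvPick pvm svm f))))

-- ===== PRECONDITION & SPEC =====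
def Spec_merge_engine_cap_maps (primary : Option (List (String × List (String × Option (List (String × String)))))) (secondary : Option (List (String × List (String × Option (List (String × String)))))) (out : List (String × List (String × Option (List (String × String))))) : Prop := out = merge_engine_cap_maps_alt primary secondary
instance (primary : Option (List (String × List (String × Option (List (String × String)))))) (secondary : Option (List (String × List (String × Option (List (String × String)))))) (out : List (String × List (String × Option (List (String × String))))) : Decidable (Spec_merge_engine_cap_maps primary secondary out) := by
  unfold Spec_merge_engine_cap_maps
  letI h1 : DecidableEq (List (String × String)) := inferInstance
  letI h2 : DecidableEq (Option (List (String × String))) := inferInstance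
  letI h3 : DecidableEq (String × Option (List (String × String))) := inferInstance
  letI h4 : DecidableEq (List (String × Option (List (String × String)))) := inferInstance
  letI h5 : DecidableEq (String × List (String × Option (List (String × String)))) := inferInstance
  letI h6 : DecidableEq (List (String × List (String × Option (List (String × String))))) := inferInstance
  exact h6 _ _

-- ===== CLAIM (what is proved, stated in full; the proofs are below) =====
def Claim_equal_merge_engine_cap_maps : Prop := ∀ (primary : Option (List (String × List (String × Option (List (String × String)))))) (secondary : Option (List (String × List (String × Option (List (String × String)))))), Dom_merge_engine_cap_maps primary secondary → Spec_merge_engine_cap_maps primary secondary (merge_engine_cap_maps primary secondary)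

-- ===== LEMMAS AND PROOFS =====

-- an entry dict {"with_filter": a, "without_filter": b}
def mkE (a b : Option (List (String × String))) : PySem.Dict String (Option (List (String × String))) :=
  PySem.Dict.ofList [("with_filter", a), ("without_filter", b)]

-- one field after A's fill loop: keep a if set, else copy sv if present
def gM (a sv : Option (List (String × String))) : Option (List (String × String)) :=
  if a = none then (match sv with | some l => some (pvCopy l) | none => none) else a

-- an entry after A's secondary fill with values vs? (none = engine not in secondary)
def fillE (d : PySem.Dict String (Option (List (String × String))))
    (vs? : Option (List (String × Option (List (String × String))))) :
    PySem.Dict String (Option (List (String × String))) :=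
  match vs? with
  | some vs => ["with_filter", "without_filter"].foldl (fun c f => pvFill c (PySem.Dict.ofList vs) f) d
  | none => d

lemma mkE_get_wf (a b : Option (List (String × String))) : (mkE a b).get? "with_filter" = some a := rfl
lemma mkE_get_wo (a b : Option (List (String × String))) : (mkE a b).get? "without_filter" = some b := rfl
lemma mkE_insert_wf (a b c : Option (List (String × String))) : (mkE a b).insert "with_filter" c = mkE c b := rfl
lemma mkE_insert_wo (a b c : Option (List (String × String))) : (mkE a b).insert "without_filter" c = mkE a c := rfl
lemma mkE_items (a b : Option (List (String × String))) : (mkE a b).items = [("with_filter", a), ("without_filter", b)] := rfl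

lemma fill2_mkE (vsd : PySem.Dict String (Option (List (String × String)))) (a b : Option (List (String × String))) :
    ["with_filter", "without_filter"].foldl (fun c f => pvFill c vsd f) (mkE a b)
      = mkE (gM a ((vsd.get? "with_filter").getD none)) (gM b ((vsd.get? "without_filter").getD none)) := by
  have h1 : pvFill (mkE a b) vsd "with_filter" = mkE (gM a ((vsd.get? "with_filter").getD none)) b := by
    unfold pvFill gM
    rw [mkE_get_wf]
    cases hsv : (vsd.get? "with_filter").getD none <;> cases a <;> simp [mkE_insert_wf]
  have h2 : ∀ a', pvFill (mkE a' b) vsd "without_filter" = mkE a' (gM b ((vsd.get? "without_filter").getD none)) := by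
    intro a'
    unfold pvFill gM
    rw [mkE_get_wo]
    cases hsv : (vsd.get? "without_filter").getD none <;> cases b <;> simp [mkE_insert_wo]
  simp only [List.foldl, h1, h2]

lemma pick_core (pvm svm : PySem.Dict String (Option (List (String × String)))) (f : String) :
    pvPick pvm svm f = gM (pvInit ((pvm.get? f).getD none)) ((svm.get? f).getD none) := by
  unfold pvPick pvPickS pvInit gM
  cases hpv : (pvm.get? f).getD none with
  | none => cases (svm.get? f).getD none <;> simp
  | some l =>
    by_cases hl : l.isEmpty <;> cases (svm.get? f).getD none <;> simp [hl]

lemma fillE_none (d : PySem.Dict String (Option (List (String × String)))) : fillE d none = d := rfl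

lemma get?_mk_nil_str {ν : Type} (x : String) : (PySem.Dict.mk ([] : List (String × ν))).get? x = none := rfl

-- the secondary loop, characterised: existing entries get filled from their secondary values,
-- secondary-only engines are appended with a filled default entry
lemma foldl_pvStep_items (l : List (String × List (String × Option (List (String × String)))))
    (m : PySem.Dict String (PySem.Dict String (Option (List (String × String)))))
    (hm : m.keys.Nodup) (hl : (l.map Prod.fst).Nodup)
    (hs : ∀ p ∈ m.items, ∃ a b, p.2 = mkE a b) :
    (l.foldl pvStep m).items
      = m.items.map (fun p => (p.1, fillE p.2 ((PySem.Dict.mk l).get? p.1)))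
        ++ (l.filter (fun q => !(m.contains q.1))).map (fun q => (q.1, fillE pvDefaultEntry (some q.2))) := by
  induction l generalizing m with
  | nil =>
    simp [fillE_none, get?_mk_nil_str]
  | cons q t ih =>
    obtain ⟨e, vs⟩ := q
    simp only [List.map_cons, List.nodup_cons] at hl
    obtain ⟨he, hlt⟩ := hl
    by_cases hc : m.contains e = true
    · -- e already present in m
      obtain ⟨p0, hp0, hkey⟩ : ∃ p0 ∈ m.items, p0.1 = e := by
        have := (PySem.Dict.contains_iff_mem_keys (d := m) (k := e)).mp hc
        simp only [PySem.Dict.keys, List.mem_map] at this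
        obtain ⟨p0, hp0, hfst⟩ := this
        exact ⟨p0, hp0, hfst⟩
      obtain ⟨a, b, hab⟩ := hs p0 hp0
      have hget : m.get? e = some (mkE a b) := by
        have := PySem.Dict.get?_of_mem_items (d := m) (k := p0.1) (v := p0.2) (by simpa using hp0) hm
        rw [hkey] at this; rw [this, hab]
      have hstep : pvStep m (e, vs)
          = m.insert e (mkE (gM a (((PySem.Dict.ofList vs).get? "with_filter").getD none))
                            (gM b (((PySem.Dict.ofList vs).get? "without_filter").getD none))) := by
        simp only [pvStep]
        rw [PySem.Dict.setdefault_of_contains m pvDefaultEntry hc, hget]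
        simp only [Option.getD_some, fill2_mkE]
      rw [List.foldl_cons, hstep]
      set E' := mkE (gM a (((PySem.Dict.ofList vs).get? "with_filter").getD none))
                    (gM b (((PySem.Dict.ofList vs).get? "without_filter").getD none)) with hE'
      have hm' : (m.insert e E').keys.Nodup := by
        rw [PySem.Dict.keys_insert_of_contains m E' hc]; exact hm
      have hs' : ∀ p ∈ (m.insert e E').items, ∃ a' b', p.2 = mkE a' b' := by
        intro p hp
        rcases (PySem.Dict.mem_items_insert m e E' p).mp hp with h | ⟨hpm, _⟩
        · exact ⟨_, _, by rw [h]⟩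
        · exact hs p hpm
      rw [ih _ hm' hlt hs']
      have hitems : (m.insert e E').items = m.items.map (fun p => if p.1 == e then (e, E') else p) :=
        PySem.Dict.items_insert_of_contains m E' hc
      rw [hitems, List.map_map]
      congr 1
      · apply List.map_congr_left
        intro p hp
        by_cases hpe : p.1 = e
        · have hp2 : p.2 = mkE a b := by
            have := PySem.Dict.get?_of_mem_items (d := m) (k := p.1) (v := p.2) (by simpa using hp) hm
            rw [hpe, hget] at this
            exact Option.some.injEq _ _ ▸ (by simpa using this.symm)
          have htnone : (PySem.Dict.mk t).get? e = none := by
            rw [PySem.Dict.get?_eq_none_iff_not_mem_keys]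
            simpa [PySem.Dict.keys] using he
          have hgcons : (PySem.Dict.mk ((e, vs) :: t)).get? e = some vs := by
            rw [PySem.Dict.get?_mk_cons]; simp
          simp only [Function.comp_apply, hpe, hp2, hgcons, beq_self_eq_true, if_true, htnone, fillE_none]
          show (e, E') = (e, fillE (mkE a b) (some vs))
          simp only [fillE, fill2_mkE, hE']
        · have : (p.1 == e) = false := by simp [hpe]
          simp only [Function.comp_apply, this, Bool.false_eq_true, if_false]
          rw [PySem.Dict.get?_mk_cons]
          simp [Ne.symm hpe]
      · have hfe : List.filter (fun q => !(m.contains q.1)) ((e, vs) :: t)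
            = List.filter (fun q => !(m.contains q.1)) t := by
          simp [hc]
        rw [hfe]
        congr 1
        apply List.filter_congr
        intro q hq
        have hqe : q.1 ≠ e := by
          intro h; exact he (h ▸ List.mem_map_of_mem hq)
        simp [PySem.Dict.contains_insert, hqe]
    · -- e is new: appended with a filled default entry
      have hcf : m.contains e = false := by simpa using hc
      have hstep : pvStep m (e, vs) = m.insert e (fillE pvDefaultEntry (some vs)) := by
        simp only [pvStep]
        rw [PySem.Dict.setdefault_of_not_contains m pvDefaultEntry hcf]
        rw [PySem.Dict.get?_insert_self, PySem.Dict.insert_insert_self]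
        rfl
      rw [List.foldl_cons, hstep]
      set E0 := fillE pvDefaultEntry (some vs) with hE0
      have hne : e ∉ m.keys := fun h => by
        rw [(PySem.Dict.contains_iff_mem_keys m e).mpr h] at hcf; cases hcf
      have hm' : (m.insert e E0).keys.Nodup := by
        rw [PySem.Dict.keys_insert_of_not_contains m E0 hcf]
        refine List.Nodup.append hm (List.nodup_singleton e) ?_
        intro x hx hxe
        rw [List.mem_singleton] at hxe
        exact hne (hxe ▸ hx)
      have hs' : ∀ p ∈ (m.insert e E0).items, ∃ a' b', p.2 = mkE a' b' := by
        intro p hp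
        rcases (PySem.Dict.mem_items_insert m e E0 p).mp hp with h | ⟨hpm, _⟩
        · refine ⟨gM none (((PySem.Dict.ofList vs).get? "with_filter").getD none),
                 gM none (((PySem.Dict.ofList vs).get? "without_filter").getD none), ?_⟩
          rw [h]
          show fillE pvDefaultEntry (some vs) = _
          simp only [fillE]
          exact fill2_mkE (PySem.Dict.ofList vs) none none
        · exact hs p hpm
      rw [ih _ hm' hlt hs']
      have hitems : (m.insert e E0).items = m.items ++ [(e, E0)] :=
        PySem.Dict.items_insert_of_not_contains m E0 hcf
      rw [hitems, List.map_append]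
      have hmape : ∀ p ∈ m.items, ((fun p => (p.1, fillE p.2 ((PySem.Dict.mk t).get? p.1))) p)
          = ((fun p => (p.1, fillE p.2 ((PySem.Dict.mk ((e, vs) :: t)).get? p.1))) p) := by
        intro p hp
        have hpe : p.1 ≠ e := fun h => hne (h ▸ List.mem_map_of_mem hp)
        beta_reduce
        rw [PySem.Dict.get?_mk_cons]
        simp [Ne.symm hpe]
      rw [List.map_congr_left hmape]
      have hsingle : List.map (fun p => (p.1, fillE p.2 ((PySem.Dict.mk t).get? p.1))) [(e, E0)] = [(e, E0)] := by
        have htnone : (PySem.Dict.mk t).get? e = none := by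
          rw [PySem.Dict.get?_eq_none_iff_not_mem_keys]
          simpa [PySem.Dict.keys] using he
        simp [htnone, fillE_none]
      rw [hsingle]
      have hfilter : List.filter (fun q => !((m.insert e E0).contains q.1)) t
          = List.filter (fun q => !(m.contains q.1)) t := by
        apply List.filter_congr
        intro q hq
        have hqe : q.1 ≠ e := fun h => he (h ▸ List.mem_map_of_mem hq)
        simp [PySem.Dict.contains_insert, hqe]
      rw [hfilter, List.filter_cons]
      simp only [hcf, Bool.not_false, if_pos]
      simp [List.append_assoc, hE0]

lemma gM_none (a : Option (List (String × String))) : gM a none = a := by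
  unfold gM; cases a <;> simp

lemma pick_core' (pvm svm : PySem.Dict String (Option (List (String × String)))) :
    ["with_filter", "without_filter"].map (fun f => (f, pvPick pvm svm f))
      = [("with_filter", gM (pvInit ((pvm.get? "with_filter").getD none)) ((svm.get? "with_filter").getD none)),
         ("without_filter", gM (pvInit ((pvm.get? "without_filter").getD none)) ((svm.get? "without_filter").getD none))] := by
  simp [List.map, pick_core]

lemma get?_ofList_nil {ν : Type} (x : String) : (PySem.Dict.ofList ([] : List (String × ν))).get? x = none := rfl

-- the main branch of both programs, as item lists
lemma main_eq (pd sd : PySem.Dict String (List (String × Option (List (String × String)))))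
    (hpd : pd.keys.Nodup) (hsd : sd.keys.Nodup) :
    ((sd.items.foldl pvStep (PySem.Dict.ofList (pd.items.map (fun q =>
        (q.1, PySem.Dict.ofList
          [("with_filter", pvInit (((PySem.Dict.ofList q.2).get? "with_filter").getD none)),
           ("without_filter", pvInit (((PySem.Dict.ofList q.2).get? "without_filter").getD none))]))))).items.map
      (fun q => (q.1, q.2.items)))
    = (pd.keys ++ sd.keys.filter (fun e => !(pd.contains e))).map (fun e =>
        (e, ["with_filter", "without_filter"].map (fun f =>
          (f, pvPick (PySem.Dict.ofList ((pd.get? e).getD []))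
                     (PySem.Dict.ofList ((sd.get? e).getD [])) f)))) := by
  set F := fun (q : String × List (String × Option (List (String × String)))) =>
    (q.1, PySem.Dict.ofList
      [("with_filter", pvInit (((PySem.Dict.ofList q.2).get? "with_filter").getD none)),
       ("without_filter", pvInit (((PySem.Dict.ofList q.2).get? "without_filter").getD none))]) with hF
  set m0 := PySem.Dict.ofList (pd.items.map F) with hm0def
  have hofl : m0 = (pd.items.map F).foldl (fun d p => d.insert p.1 p.2) PySem.Dict.empty := rfl
  have hkeysF : (pd.items.map F).map Prod.fst = pd.keys := by
    rw [List.map_map]; rfl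
  have hm0items : m0.items = pd.items.map F := by
    rw [hofl, PySem.Dict.items_foldl_insert_fresh (pd.items.map F) (fun a => a.1) (fun a => a.2)
      PySem.Dict.empty (fun a _ => rfl) (by rw [hkeysF]; exact hpd)]
    have hemp : PySem.Dict.empty.items = ([] : List (String × PySem.Dict String (Option (List (String × String))))) := rfl
    rw [hemp, List.nil_append]
    simp only [Prod.mk.eta, List.map_id']
  have hm0keys : m0.keys = pd.keys := by
    show m0.items.map Prod.fst = pd.keys
    rw [hm0items, hkeysF]
  have hm0contains : ∀ x, m0.contains x = pd.contains x := by
    intro x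
    rw [PySem.Dict.contains_eq_decide_mem_keys, PySem.Dict.contains_eq_decide_mem_keys, hm0keys]
  have hs0 : ∀ p ∈ m0.items, ∃ a b, p.2 = mkE a b := by
    intro p hp
    rw [hm0items] at hp
    obtain ⟨q, _, rfl⟩ := List.mem_map.mp hp
    exact ⟨_, _, rfl⟩
  have hmk : PySem.Dict.mk sd.items = sd := rfl
  rw [foldl_pvStep_items sd.items m0 (by rw [hm0keys]; exact hpd) hsd hs0, hmk, hm0items]
  rw [List.map_append, List.map_map, List.map_map, List.map_append]
  congr 1
  · -- primary engines
    have hkeymap : pd.keys.map (fun e =>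
        (e, ["with_filter", "without_filter"].map (fun f =>
          (f, pvPick (PySem.Dict.ofList ((pd.get? e).getD []))
                     (PySem.Dict.ofList ((sd.get? e).getD [])) f))))
        = pd.items.map ((fun e =>
            (e, ["with_filter", "without_filter"].map (fun f =>
              (f, pvPick (PySem.Dict.ofList ((pd.get? e).getD []))
                         (PySem.Dict.ofList ((sd.get? e).getD [])) f)))) ∘ Prod.fst) := by
      show (pd.items.map Prod.fst).map _ = _
      rw [List.map_map]
    rw [hkeymap]
    apply List.map_congr_left
    intro q hq
    have hget : pd.get? q.1 = some q.2 :=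
      PySem.Dict.get?_of_mem_items (d := pd) (k := q.1) (v := q.2) (by simpa using hq) hpd
    simp only [Function.comp_apply, hF, hget, Option.getD_some]
    cases hsdq : sd.get? q.1 with
    | none =>
      simp only [fillE_none, Option.getD_none, pick_core']
      show _ = (q.1, _)
      congr 1
      show (mkE (pvInit (((PySem.Dict.ofList q.2).get? "with_filter").getD none))
                (pvInit (((PySem.Dict.ofList q.2).get? "without_filter").getD none))).items = _
      rw [mkE_items]
      simp [get?_ofList_nil, gM_none]
    | some vs =>
      simp only [Option.getD_some, pick_core']
      show (q.1, (fillE (mkE (pvInit (((PySem.Dict.ofList q.2).get? "with_filter").getD none))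
                (pvInit (((PySem.Dict.ofList q.2).get? "without_filter").getD none))) (some vs)).items) = (q.1, _)
      congr 1
      simp only [fillE, fill2_mkE, mkE_items]
  · -- secondary-only engines
    have hfilt : sd.keys.filter (fun e => !(pd.contains e))
        = (sd.items.filter (fun q => !(pd.contains q.1))).map Prod.fst := by
      show (sd.items.map Prod.fst).filter _ = _
      rw [List.filter_map]
      rfl
    have hfilt2 : sd.items.filter (fun q => !(m0.contains q.1))
        = sd.items.filter (fun q => !(pd.contains q.1)) := by
      apply List.filter_congr
      intro q _
      rw [hm0contains]
    rw [hfilt2, hfilt, List.map_map, List.map_map]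
    apply List.map_congr_left
    intro q hq
    have hqmem : q ∈ sd.items := (List.mem_filter.mp hq).1
    have hnc : pd.contains q.1 = false := by
      have := (List.mem_filter.mp hq).2
      simpa using this
    have hpdnone : pd.get? q.1 = none := by
      rw [PySem.Dict.get?_eq_none_iff_not_mem_keys]
      intro hmem
      rw [(PySem.Dict.contains_iff_mem_keys pd q.1).mpr hmem] at hnc
      cases hnc
    have hsdq : sd.get? q.1 = some q.2 :=
      PySem.Dict.get?_of_mem_items (d := sd) (k := q.1) (v := q.2) (by simpa using hqmem) hsd
    simp only [Function.comp_apply, hpdnone, hsdq, Option.getD_some, Option.getD_none, pick_core']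
    show (q.1, (fillE pvDefaultEntry (some q.2)).items) = (q.1, _)
    congr 1
    show (fillE (mkE none none) (some q.2)).items = _
    simp only [fillE, fill2_mkE, mkE_items]
    simp [get?_ofList_nil, pvInit]

-- ===== VERDICT (by name: the statement is the Claim_ definition above) =====
theorem merge_engine_cap_maps_spec : Claim_equal_merge_engine_cap_maps := by
  intro primary secondary _
  unfold Spec_merge_engine_cap_maps
  simp only [merge_engine_cap_maps, merge_engine_cap_maps_alt]
  split_ifs
  · rfl
  · rfl
  · rfl
  · exact main_eq (PySem.Dict.ofList (primary.getD [])) (PySem.Dict.ofList (secondary.getD []))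
      (PySem.Dict.nodup_keys_ofList _) (PySem.Dict.nodup_keys_ofList _)
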